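-- pv_equiv track=rewrite | github.com/dbt-labs/dbt-adapters | dbt-snowflake/src/dbt/adapters/snowflake/relation_configs/hybrid_table.py | _extract_data_type
-- ===== SOURCE A (Python) =====
-- def _normalize_whitespace(value: str) -> str:
--     return " ".join(value.strip().split())
--
-- def _extract_data_type(definition: str) -> str:
--     upper_definition = definition.upper()
--     stop_keywords = [
--         " NOT NULL",
--         " NULL",
--         " DEFAULT ",
--         " AUTOINCREMENT",
--         " IDENTITY",
--         " COMMENT ",
--     ]
--     end_index = len(definition)
--     for keyword in stop_keywords:
--         position = upper_definition.find(keyword)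
--         if position != -1 and position < end_index:
--             end_index = position
--     return _normalize_whitespace(definition[:end_index])
-- ===== SOURCE B (Python) =====
-- def _normalize_whitespace(value: str) -> str:
--     return " ".join(value.strip().split())
--
-- _STOP_KEYWORDS = (
--     " NOT NULL",
--     " NULL",
--     " DEFAULT ",
--     " AUTOINCREMENT",
--     " IDENTITY",
--     " COMMENT ",
-- )
--
-- def _extract_data_type(definition: str) -> str:
--     upper_definition = definition.upper()
--     end_index = len(definition)
--     for i in range(len(upper_definition)):
--         if upper_definition.startswith(_STOP_KEYWORDS, i):
--             end_index = i
--             break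
--     return _normalize_whitespace(definition[:end_index])
-- ===== Notes on version B (the rewrite author's own statement) =====
-- stated objective: alternative
-- what changed: Replaces six full-string .find scans with a running minimum by one left-to-right scan that stops at the first position where any stop keyword starts (str.startswith with a tuple), which is the same leftmost stop index.
import Mathlib
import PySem

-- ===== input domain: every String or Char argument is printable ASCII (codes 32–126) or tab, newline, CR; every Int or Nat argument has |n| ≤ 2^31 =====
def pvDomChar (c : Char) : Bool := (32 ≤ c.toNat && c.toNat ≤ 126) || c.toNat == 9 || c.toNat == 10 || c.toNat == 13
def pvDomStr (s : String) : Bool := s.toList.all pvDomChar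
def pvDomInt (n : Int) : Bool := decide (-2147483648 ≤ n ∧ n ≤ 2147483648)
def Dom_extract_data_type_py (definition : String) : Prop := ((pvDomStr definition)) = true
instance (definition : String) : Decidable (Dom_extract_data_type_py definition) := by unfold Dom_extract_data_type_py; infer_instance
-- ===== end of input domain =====

-- B replaces A's six full-string find scans + running minimum by one left-to-right scan
-- stopping at the first position where any stop keyword starts (objective: alternative).

-- ===== PORT A =====
def normalize_whitespace_py (value : String) : String :=
  PySem.Str.join " " (PySem.Str.split₀ (PySem.Str.strip value))

def extract_data_type_py (definition : String) : String :=
  let upper_definition := PySem.Str.upper definition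
  let stop_keywords : List String :=
    [" NOT NULL", " NULL", " DEFAULT ", " AUTOINCREMENT", " IDENTITY", " COMMENT "]
  let end_index : Int :=
    stop_keywords.foldl (fun e kw =>
      let position := PySem.Str.find upper_definition kw
      if position ≠ -1 ∧ position < e then position else e)
      (PySem.Str.len definition)
  normalize_whitespace_py (PySem.Str.slice definition none (some end_index))

-- ===== PORT B =====
def altStopKeywords : List (List Char) :=
  [" NOT NULL".toList, " NULL".toList, " DEFAULT ".toList,
   " AUTOINCREMENT".toList, " IDENTITY".toList, " COMMENT ".toList]

-- the 'for i in range(len(upper)): if upper.startswith(keywords, i): break' scan of Source B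
def altFindStop : List Char → Nat
  | [] => 0
  | c :: rest =>
    if altStopKeywords.any (fun kw => PySem.Chars.startswith (c :: rest) kw) then 0
    else altFindStop rest + 1

def extract_data_type_py_alt (definition : String) : String :=
  let upper := PySem.Chars.upper definition.toList
  let end_index := altFindStop upper
  String.ofList (PySem.Chars.join [' ']
    (PySem.Chars.split₀ (PySem.Chars.strip (definition.toList.take end_index))))

-- ===== PRECONDITION & SPEC =====
def Spec_extract_data_type_py (definition : String) (out : String) : Prop := out = extract_data_type_py_alt definition
instance (definition : String) (out : String) : Decidable (Spec_extract_data_type_py definition out) := by unfold Spec_extract_data_type_py; infer_instance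

-- ===== CLAIM (what is proved, stated in full; the proofs are below) =====
def Claim_equal_extract_data_type_py : Prop := ∀ (definition : String), Dom_extract_data_type_py definition → Spec_extract_data_type_py definition (extract_data_type_py definition)

-- ===== LEMMAS AND PROOFS =====

-- A's fold step
def pvStep (s : List Char) (e : Int) (kw : List Char) : Int :=
  let position := PySem.Chars.find s kw
  if position ≠ -1 ∧ position < e then position else e

-- invariant of A's running-minimum fold
theorem pv_fold_spec (s : List Char) :
    ∀ (kws : List (List Char)) (e : Int), 0 ≤ e →
      0 ≤ kws.foldl (pvStep s) e ∧ kws.foldl (pvStep s) e ≤ e ∧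
      (∀ kw ∈ kws, ∀ i : Nat, (i : Int) < kws.foldl (pvStep s) e → ¬ kw <+: s.drop i) ∧
      (kws.foldl (pvStep s) e = e ∨ ∃ kw ∈ kws, kw <+: s.drop (kws.foldl (pvStep s) e).toNat) := by
  intro kws
  induction kws with
  | nil => intro e he; exact ⟨he, le_refl _, by simp, Or.inl rfl⟩
  | cons kw rest ih =>
    intro e he
    simp only [List.foldl_cons]
    by_cases hc : PySem.Chars.find s kw ≠ -1 ∧ PySem.Chars.find s kw < e
    · -- step takes the find position
      have hp : 0 ≤ PySem.Chars.find s kw := by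
        rcases (PySem.Chars.neg_one_le_find s kw).lt_or_eq with h | h
        · omega
        · exact absurd h.symm hc.1
      have hstep : pvStep s e kw = PySem.Chars.find s kw := by
        simp [pvStep, hc]
      rw [hstep]
      obtain ⟨h0, h1, h2, h3⟩ := ih (PySem.Chars.find s kw) hp
      refine ⟨h0, by omega, ?_, ?_⟩
      · intro kw' hmem i hi
        rcases List.mem_cons.mp hmem with hmem | hmem
        · subst hmem
          have := (PySem.Chars.find_spec (s := s) (sub := kw') hp).2 i
          apply this
          have : (i : Int) < PySem.Chars.find s kw' := lt_of_lt_of_le hi h1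
          omega
        · exact h2 kw' hmem i hi
      · rcases h3 with h | h
        · exact Or.inr ⟨kw, by simp, by rw [h]; exact (PySem.Chars.find_spec hp).1⟩
        · exact Or.inr (let ⟨k, hk, hpre⟩ := h; ⟨k, by simp [hk], hpre⟩)
    · -- step keeps e
      have hstep : pvStep s e kw = e := by simp [pvStep, hc]
      rw [hstep]
      obtain ⟨h0, h1, h2, h3⟩ := ih e he
      refine ⟨h0, h1, ?_, ?_⟩
      · intro kw' hmem i hi
        rcases List.mem_cons.mp hmem with hmem | hmem
        · subst hmem
          by_cases hfind : PySem.Chars.find s kw' = -1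
          · intro hpre
            have : PySem.Chars.isIn kw' s = true :=
              (PySem.Chars.exists_prefix_drop_iff_isIn kw' s).mp ⟨i, hpre⟩
            have := (PySem.Chars.isIn_iff_infix kw' s).mp this
            exact (PySem.Chars.find_eq_neg_one_iff s kw').mp hfind this
          · -- find ≥ e, so i < fold ≤ e ≤ find: first occurrence is not before find
            have hge : e ≤ PySem.Chars.find s kw' := by
              by_contra hlt
              exact hc ⟨hfind, by omega⟩
            have hp : 0 ≤ PySem.Chars.find s kw' := by
              have := PySem.Chars.neg_one_le_find s kw'; omega
            have := (PySem.Chars.find_spec (s := s) (sub := kw') hp).2 i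
            apply this
            have : (i : Int) < PySem.Chars.find s kw' := by
              have := lt_of_lt_of_le hi h1; omega
            omega
        · exact h2 kw' hmem i hi
      · rcases h3 with h | h
        · exact Or.inl h
        · exact Or.inr (let ⟨k, hk, hpre⟩ := h; ⟨k, by simp [hk], hpre⟩)

-- spec of B's left-to-right scan
theorem pv_scan_spec : ∀ (s : List Char),
    altFindStop s ≤ s.length ∧
    (∀ i < altFindStop s, ¬ ∃ kw ∈ altStopKeywords, kw <+: s.drop i) ∧
    (altFindStop s < s.length → ∃ kw ∈ altStopKeywords, kw <+: s.drop (altFindStop s)) := by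
  intro s
  induction s with
  | nil => simp [altFindStop]
  | cons c rest ih =>
    obtain ⟨ih1, ih2, ih3⟩ := ih
    by_cases h : altStopKeywords.any (fun kw => PySem.Chars.startswith (c :: rest) kw) = true
    · have h0 : altFindStop (c :: rest) = 0 := by simp [altFindStop, h]
      refine ⟨by simp [h0], by simp [h0], fun _ => ?_⟩
      rw [List.any_eq_true] at h
      obtain ⟨kw, hkw, hsw⟩ := h
      exact ⟨kw, hkw, by rw [h0]; simpa using (PySem.Chars.startswith_iff _ _).mp hsw⟩
    · have hrec : altFindStop (c :: rest) = altFindStop rest + 1 := by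
        simp [altFindStop, h]
      rw [hrec]
      refine ⟨by simpa using ih1, ?_, ?_⟩
      · intro i hi
        cases i with
        | zero =>
          intro ⟨kw, hkw, hpre⟩
          exact h (List.any_eq_true.mpr ⟨kw, hkw, (PySem.Chars.startswith_iff _ _).mpr (by simpa using hpre)⟩)
        | succ j =>
          simpa using ih2 j (by omega)
      · intro hlt
        simpa using ih3 (by simpa using hlt)

theorem pv_length_upper (l : List Char) : (PySem.Chars.upper l).length = l.length := by
  simp [PySem.Chars.upper]

-- the two stop indices agree
theorem pv_end_eq (s : List Char) :
    (altStopKeywords.foldl (pvStep s) (s.length : Int)) = (altFindStop s : Int) := by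
  obtain ⟨h0, h1, h2, h3⟩ := pv_fold_spec s altStopKeywords (s.length : Int) (by positivity)
  obtain ⟨g1, g2, g3⟩ := pv_scan_spec s
  set e := altStopKeywords.foldl (pvStep s) (s.length : Int) with he
  set n := altFindStop s with hn
  rcases lt_trichotomy e (n : Int) with h | h | h
  · -- e < n : fold attained a match at e.toNat, scan says none before n
    exfalso
    rcases h3 with hE | ⟨kw, hkw, hpre⟩
    · omega
    · exact g2 e.toNat (by omega) ⟨kw, hkw, hpre⟩
  · exact h
  · -- n < e : scan found a match at n (n < e ≤ len), fold says none before e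
    exfalso
    obtain ⟨kw, hkw, hpre⟩ := g3 (by omega)
    exact h2 kw hkw n (by omega) hpre

-- ===== VERDICT (by name: the statement is the Claim_ definition above) =====
theorem pv_foldA_eq (definition : String) :
    ([" NOT NULL", " NULL", " DEFAULT ", " AUTOINCREMENT", " IDENTITY", " COMMENT "] : List String).foldl
      (fun e kw =>
        let position := PySem.Str.find (PySem.Str.upper definition) kw
        if position ≠ -1 ∧ position < e then position else e)
      (PySem.Str.len definition)
      = (altFindStop (PySem.Chars.upper definition.toList) : Int) := by
  have h1 : ([" NOT NULL", " NULL", " DEFAULT ", " AUTOINCREMENT", " IDENTITY", " COMMENT "] : List String).foldl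
      (fun e kw =>
        let position := PySem.Str.find (PySem.Str.upper definition) kw
        if position ≠ -1 ∧ position < e then position else e)
      (PySem.Str.len definition)
      = altStopKeywords.foldl (pvStep (PySem.Chars.upper definition.toList))
          (((PySem.Chars.upper definition.toList).length : Nat) : Int) := by
    simp [pvStep, PySem.Str.find_eq, PySem.Str.toList_upper, PySem.Str.len_eq,
      pv_length_upper, altStopKeywords, List.foldl_cons, List.foldl_nil]
  rw [h1, pv_end_eq]

theorem extract_data_type_py_spec : Claim_equal_extract_data_type_py := by
  intro definition _
  unfold Spec_extract_data_type_py extract_data_type_py extract_data_type_py_alt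
  simp only [normalize_whitespace_py, pv_foldA_eq]
  apply String.toList_inj.mp
  have hn : (altFindStop (PySem.Chars.upper definition.toList) : Int) ≥ 0 := by positivity
  have hslice : (PySem.Str.slice definition none
      (some (altFindStop (PySem.Chars.upper definition.toList) : Int))).toList
      = definition.toList.take (altFindStop (PySem.Chars.upper definition.toList)) := by
    rw [PySem.Str.toList_slice, PySem.Chars.slice_eq_listSlice,
      PySem.List.slice_to _ hn]
    simp
  simp [PySem.Str.toList_join, hslice, PySem.Str.toList_strip,
    PySem.Str.split₀_map_toList, String.toList_ofList]
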